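-- pv_equiv track=rewrite | github.com/virak-junior-dev/aero-guardian | src/analysis/faa_analysis.py | find_description_column
-- ===== SOURCE A (Python) =====
-- from typing import List, Dict, Optional, Tuple, Any
--
-- def find_description_column(columns: List[str]) -> Optional[str]:
--     """Find the narrative description column from the Excel headers."""
--     # Common column names used by FAA across different quarterly releases
--     candidates = [
--         "EventDescription", "Event Description", "DESCRIPTION",
--         "Summary", "SUMMARY", "Narrative", "NARRATIVE",
--         "Event_Description", "event_description",
--         "Comments", "COMMENTS", "Details", "DETAILS",
--         "EventSummary", "Event Summary",
--     ]
--     for c in candidates: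
--         for col in columns:
--             if col and str(col).strip().lower() == c.lower():
--                 return col
--     # Fallback: find any column containing "descr" or "summar" or "narrat"
--     for col in columns:
--         if col and any(kw in str(col).lower() for kw in ["descr", "summar", "narrat", "comment", "detail"]):
--             return col
--     return None
-- ===== SOURCE B (Python) =====
-- from typing import List, Optional
--
-- _CANDIDATES = [
--     "EventDescription", "Event Description", "DESCRIPTION",
--     "Summary", "SUMMARY", "Narrative", "NARRATIVE",
--     "Event_Description", "event_description",
--     "Comments", "COMMENTS", "Details", "DETAILS",
--     "EventSummary", "Event Summary",
-- ]
-- _KEYWORDS = ["descr", "summar", "narrat", "comment", "detail"]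
--
--
-- def _rank(norm):
--     """Index of the first candidate whose lowercase form equals norm, else None."""
--     for i, c in enumerate(_CANDIDATES):
--         if c.lower() == norm:
--             return i
--     return None
--
--
-- def find_description_column(columns: List[str]) -> Optional[str]:
--     """Find the narrative description column from the Excel headers.
--
--     Single column-major pass: keep the column whose normalized name has the
--     smallest candidate rank (earliest column wins ties), and separately the
--     first keyword-bearing column as a fallback.
--     """
--     best = None       # (rank, column) with the smallest rank seen so far
--     fallback = None   # first truthy column containing a narrative keyword
--     for col in columns:
--         if not col:
--             continue
--         low = str(col).lower()
--         r = _rank(str(col).strip().lower())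
--         if r is not None and (best is None or r < best[0]):
--             best = (r, col)
--         if fallback is None and any(kw in low for kw in _KEYWORDS):
--             fallback = col
--     return best[1] if best is not None else fallback
-- ===== Notes on version B (the rewrite author's own statement) =====
-- stated objective: alternative
-- what changed: Replaces A's candidate-major nested loops (rescan all columns per candidate, early return) with one column-major pass keeping an argmin accumulator: each column gets the rank of its normalized name in the candidate list and the earliest column of minimal rank wins, while the keyword fallback is tracked in the same pass.
import Mathlib
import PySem

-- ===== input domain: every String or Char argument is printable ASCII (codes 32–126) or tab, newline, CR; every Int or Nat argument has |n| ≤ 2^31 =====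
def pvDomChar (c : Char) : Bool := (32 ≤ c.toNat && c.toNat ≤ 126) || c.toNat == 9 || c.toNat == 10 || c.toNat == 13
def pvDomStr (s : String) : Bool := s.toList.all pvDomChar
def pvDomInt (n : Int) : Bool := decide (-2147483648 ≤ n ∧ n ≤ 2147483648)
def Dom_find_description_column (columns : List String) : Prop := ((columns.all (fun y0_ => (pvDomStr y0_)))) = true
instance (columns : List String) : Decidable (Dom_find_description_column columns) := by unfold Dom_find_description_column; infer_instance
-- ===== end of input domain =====

-- B replaces A's candidate-major nested loops with one column-major pass keeping
-- an argmin-by-candidate-rank accumulator plus the keyword fallback (objective: alternative).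

-- Shared literal lists (the same literals appear in both Python sources)
def pvCandidates : List String :=
  ["EventDescription", "Event Description", "DESCRIPTION",
   "Summary", "SUMMARY", "Narrative", "NARRATIVE",
   "Event_Description", "event_description",
   "Comments", "COMMENTS", "Details", "DETAILS",
   "EventSummary", "Event Summary"]

def pvKeywords : List String := ["descr", "summar", "narrat", "comment", "detail"]

-- ===== PORT A =====
-- inner loop: 'for col in columns: if col and str(col).strip().lower() == c.lower(): return col'
def pvA_inner (c : String) : List String → Option String
  | [] => none
  | col :: rest =>
      if col ≠ "" ∧ PySem.Str.lower (PySem.Str.strip col) = PySem.Str.lower c then some col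
      else pvA_inner c rest

-- outer loop over the candidate list
def pvA_outer (columns : List String) : List String → Option String
  | [] => none
  | c :: cs =>
      match pvA_inner c columns with
      | some col => some col
      | none => pvA_outer columns cs

-- fallback loop: first truthy column containing one of the keywords
def pvA_fallback : List String → Option String
  | [] => none
  | col :: rest =>
      if col ≠ "" ∧ pvKeywords.any (fun kw => PySem.Str.isIn kw (PySem.Str.lower col)) then some col
      else pvA_fallback rest

def find_description_column (columns : List String) : Option String :=
  match pvA_outer columns pvCandidates with
  | some col => some col
  | none => pvA_fallback columns

-- ===== PORT B =====
-- '_rank': 'for i, c in enumerate(_CANDIDATES): if c.lower() == norm: return i; return None'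
def pvRank_go (norm : String) (i : Nat) : List String → Option Nat
  | [] => none
  | c :: rest =>
      if PySem.Str.lower c = norm then some i else pvRank_go norm (i + 1) rest

def pvRank (norm : String) : Option Nat := pvRank_go norm 0 pvCandidates

-- one loop-body step of B's single pass over the columns
def pvB_step (st : Option (Nat × String) × Option String) (col : String) :
    Option (Nat × String) × Option String :=
  if col = "" then st
  else
    let low := PySem.Str.lower col
    let r := pvRank (PySem.Str.lower (PySem.Str.strip col))
    let best :=
      match r, st.1 with
      | some rv, none => some (rv, col)
      | some rv, some (rb, cb) => if rv < rb then some (rv, col) else some (rb, cb)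
      | none, b => b
    let fb :=
      match st.2 with
      | some f => some f
      | none => if pvKeywords.any (fun kw => PySem.Str.isIn kw low) then some col else none
    (best, fb)

def find_description_column_alt (columns : List String) : Option String :=
  let st := columns.foldl pvB_step (none, none)
  match st.1 with
  | some (_, c) => some c
  | none => st.2

-- ===== PRECONDITION & SPEC =====
def Spec_find_description_column (columns : List String) (out : Option String) : Prop := out = find_description_column_alt columns
instance (columns : List String) (out : Option String) : Decidable (Spec_find_description_column columns out) := by unfold Spec_find_description_column; infer_instance

-- ===== CLAIM (what is proved, stated in full; the proofs are below) =====
def Claim_equal_find_description_column : Prop := ∀ (columns : List String), Dom_find_description_column columns → Spec_find_description_column columns (find_description_column columns)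

-- ===== LEMMAS AND PROOFS =====

-- left-biased minimum-by-rank merge (proof-side reformulation of B's accumulator update)
def pvMerge (b x : Option (Nat × String)) : Option (Nat × String) :=
  match x, b with
  | none, b => b
  | some (rv, cv), none => some (rv, cv)
  | some (rv, cv), some (rb, cb) => if rv < rb then some (rv, cv) else some (rb, cb)

-- the contribution of one column, ranked relative to a candidate list
def pvEntry (cands : List String) (col : String) : Option (Nat × String) :=
  if col = "" then none
  else (pvRank_go (PySem.Str.lower (PySem.Str.strip col)) 0 cands).map (fun r => (r, col))

def pvShift (x : Option (Nat × String)) : Option (Nat × String) :=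
  x.map (fun p => (p.1 + 1, p.2))

-- B's best-accumulator fold, relative to an arbitrary candidate list
def pvBestStep (cands : List String) (b : Option (Nat × String)) (col : String) :
    Option (Nat × String) := pvMerge b (pvEntry cands col)

def pvBest (cands : List String) (cols : List String) : Option (Nat × String) :=
  cols.foldl (pvBestStep cands) none

-- B's fallback-accumulator fold
def pvFbStep (f : Option String) (col : String) : Option String :=
  if col = "" then f
  else
    match f with
    | some g => some g
    | none => if pvKeywords.any (fun kw => PySem.Str.isIn kw (PySem.Str.lower col)) then some col else none

lemma pvMerge_none_left (x : Option (Nat × String)) : pvMerge none x = x := by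
  cases x with
  | none => rfl
  | some p => obtain ⟨r, c⟩ := p; rfl

lemma pvMerge_assoc (a b c : Option (Nat × String)) :
    pvMerge (pvMerge a b) c = pvMerge a (pvMerge b c) := by
  cases a with
  | none => simp [pvMerge_none_left]
  | some pa =>
    obtain ⟨ra, ca⟩ := pa
    cases b with
    | none =>
      cases c with
      | none => rfl
      | some pc => obtain ⟨rc, cc⟩ := pc; simp [pvMerge]
    | some pb =>
      obtain ⟨rb, cb⟩ := pb
      cases c with
      | none => simp [pvMerge]
      | some pc =>
        obtain ⟨rc, cc⟩ := pc
        by_cases h1 : rb < ra <;> by_cases h2 : rc < rb <;> by_cases h3 : rc < ra <;>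
          simp only [pvMerge, if_pos, h1, h2, h3, if_false] <;>
          first
            | rfl
            | omega

-- the pair fold splits into the two independent folds
lemma pvB_step_eq (st : Option (Nat × String) × Option String) (col : String) :
    pvB_step st col = (pvBestStep pvCandidates st.1 col, pvFbStep st.2 col) := by
  obtain ⟨b, f⟩ := st
  by_cases h : col = ""
  · subst h
    have l : pvB_step (b, f) "" = (b, f) := by simp [pvB_step]
    have e1 : pvEntry pvCandidates "" = none := by simp [pvEntry]
    have e2 : pvFbStep f "" = f := rfl
    rw [l]
    show (b, f) = (pvMerge b (pvEntry pvCandidates ""), pvFbStep f "")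
    rw [e1, e2]
    rfl
  · have he : pvEntry pvCandidates col
        = (pvRank (PySem.Str.lower (PySem.Str.strip col))).map (fun r => (r, col)) := by
      unfold pvEntry pvRank
      rw [if_neg h]
    show pvB_step (b, f) col = (pvMerge b (pvEntry pvCandidates col), pvFbStep f col)
    rw [he]
    unfold pvB_step pvFbStep
    rw [if_neg h, if_neg h]
    cases hr : pvRank (PySem.Str.lower (PySem.Str.strip col)) with
    | none => cases b with
      | none => rfl
      | some p => obtain ⟨rb, cb⟩ := p; rfl
    | some rv => cases b with
      | none => rfl
      | some p => obtain ⟨rb, cb⟩ := p; rfl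

lemma pvFold_pair (cols : List String) (b : Option (Nat × String)) (f : Option String) :
    cols.foldl pvB_step (b, f) =
      (cols.foldl (pvBestStep pvCandidates) b, cols.foldl pvFbStep f) := by
  induction cols generalizing b f with
  | nil => rfl
  | cons col rest ih =>
    simp only [List.foldl_cons]
    rw [pvB_step_eq]
    exact ih _ _

-- the fallback fold is A's fallback scan
lemma pvFb_some (cols : List String) (g : String) :
    cols.foldl pvFbStep (some g) = some g := by
  induction cols with
  | nil => rfl
  | cons col rest ih =>
    simp only [List.foldl_cons]
    by_cases h : col = "" <;> simp [pvFbStep, h, ih]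

lemma pvFb_eq_fallback (cols : List String) :
    cols.foldl pvFbStep none = pvA_fallback cols := by
  induction cols with
  | nil => rfl
  | cons col rest ih =>
    by_cases h1 : col = ""
    · have st : pvFbStep none col = none := by simp [pvFbStep, h1]
      rw [List.foldl_cons, st, ih]
      show _ = if _ then _ else _
      rw [if_neg (by simp [h1])]
    · cases hkw : pvKeywords.any (fun kw => PySem.Str.isIn kw (PySem.Str.lower col)) with
      | true =>
        have st : pvFbStep none col = some col := by
          unfold pvFbStep; rw [if_neg h1, hkw]; rfl
        rw [List.foldl_cons, st, pvFb_some]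
        show _ = if _ then _ else _
        rw [if_pos ⟨h1, hkw⟩]
      | false =>
        have st : pvFbStep none col = none := by
          unfold pvFbStep; rw [if_neg h1, hkw]; rfl
        rw [List.foldl_cons, st, ih]
        show _ = if _ then _ else _
        rw [if_neg (fun hc => Bool.false_ne_true (hkw ▸ hc.2))]

-- the left fold with pvMerge satisfies the right-recursion
lemma pvBest_fold_merge (cands : List String) (cols : List String) (b : Option (Nat × String)) :
    cols.foldl (pvBestStep cands) b = pvMerge b (pvBest cands cols) := by
  induction cols generalizing b with
  | nil => cases b with
    | none => rfl
    | some p => obtain ⟨r, c⟩ := p; rfl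
  | cons col rest ih =>
    simp only [List.foldl_cons, pvBest, pvBestStep]
    rw [ih, ih (pvMerge none (pvEntry cands col))]
    rw [pvMerge_none_left, pvMerge_assoc]

lemma pvBest_cons (cands : List String) (col : String) (rest : List String) :
    pvBest cands (col :: rest) = pvMerge (pvEntry cands col) (pvBest cands rest) := by
  simp only [pvBest, List.foldl_cons, pvBestStep]
  rw [pvBest_fold_merge, pvMerge_none_left]
  rfl

-- rank offset lemma
lemma pvRank_go_shift (norm : String) (cs : List String) (i : Nat) :
    pvRank_go norm i cs = (pvRank_go norm 0 cs).map (· + i) := by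
  induction cs generalizing i with
  | nil => rfl
  | cons c rest ih =>
    by_cases h : PySem.Str.lower c = norm
    · simp [pvRank_go, h]
    · simp only [pvRank_go, if_neg h]
      rw [ih (i + 1), ih 1]
      cases pvRank_go norm 0 rest with
      | none => rfl
      | some r => simp [Option.map]; omega

-- the entry relative to c :: cs
lemma pvEntry_cons (c : String) (cs : List String) (col : String) :
    pvEntry (c :: cs) col =
      if col ≠ "" ∧ PySem.Str.lower (PySem.Str.strip col) = PySem.Str.lower c then some (0, col)
      else pvShift (pvEntry cs col) := by
  by_cases h1 : col = ""
  · simp [pvEntry, pvShift, h1]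
  · by_cases h2 : PySem.Str.lower (PySem.Str.strip col) = PySem.Str.lower c
    · simp [pvEntry, pvRank_go, h1, h2]
    · have hne : ¬ PySem.Str.lower c = PySem.Str.lower (PySem.Str.strip col) := fun h => h2 h.symm
      have hnc : ¬ (col ≠ "" ∧ PySem.Str.lower (PySem.Str.strip col) = PySem.Str.lower c) :=
        fun h => h2 h.2
      rw [if_neg hnc]
      simp only [pvEntry, pvShift, if_neg h1, pvRank_go, if_neg hne]
      rw [pvRank_go_shift _ cs 1]
      cases pvRank_go (PySem.Str.lower (PySem.Str.strip col)) 0 cs <;> simp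

lemma pvMerge_zero_left (a : String) (x : Option (Nat × String)) :
    pvMerge (some (0, a)) x = some (0, a) := by
  cases x with
  | none => rfl
  | some p =>
    obtain ⟨r, c⟩ := p
    simp [pvMerge]

lemma pvMerge_shift (a b : Option (Nat × String)) :
    pvMerge (pvShift a) (pvShift b) = pvShift (pvMerge a b) := by
  cases a with
  | none => cases b with
    | none => rfl
    | some p => obtain ⟨r, c⟩ := p; simp [pvShift, pvMerge]
  | some pa =>
    obtain ⟨ra, ca⟩ := pa
    cases b with
    | none => rfl
    | some pb =>
      obtain ⟨rb, cb⟩ := pb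
      simp only [pvShift, pvMerge, Option.map]
      by_cases h : rb < ra
      · rw [if_pos h, if_pos (by omega)]
      · rw [if_neg h, if_neg (by omega)]

-- when no column matches candidate c, best w.r.t. c :: cs is the shifted best w.r.t. cs
lemma pvBest_shift (c : String) (cs : List String) (cols : List String)
    (h : pvA_inner c cols = none) :
    pvBest (c :: cs) cols = pvShift (pvBest cs cols) := by
  induction cols with
  | nil => rfl
  | cons col rest ih =>
    have hcol : ¬ (col ≠ "" ∧ PySem.Str.lower (PySem.Str.strip col) = PySem.Str.lower c) := by
      intro hc
      simp [pvA_inner, if_pos hc] at h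
    have hrest : pvA_inner c rest = none := by
      simpa [pvA_inner, if_neg hcol] using h
    rw [pvBest_cons, pvBest_cons, pvEntry_cons, if_neg hcol, ih hrest, pvMerge_shift]

-- when the first matching column for candidate c is col0, best w.r.t. c :: cs is (0, col0)
lemma pvBest_zero (c : String) (cs : List String) (cols : List String) (col0 : String)
    (h : pvA_inner c cols = some col0) :
    pvBest (c :: cs) cols = some (0, col0) := by
  induction cols with
  | nil => simp [pvA_inner] at h
  | cons col rest ih =>
    by_cases hc : col ≠ "" ∧ PySem.Str.lower (PySem.Str.strip col) = PySem.Str.lower c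
    · have hcol : col = col0 := by simpa [pvA_inner, if_pos hc] using h
      subst hcol
      rw [pvBest_cons, pvEntry_cons, if_pos hc, pvMerge_zero_left]
    · have hrest : pvA_inner c rest = some col0 := by
        simpa [pvA_inner, if_neg hc] using h
      rw [pvBest_cons, pvEntry_cons, if_neg hc, ih hrest]
      cases he : pvEntry cs col with
      | none => rfl
      | some p =>
        obtain ⟨r, a⟩ := p
        simp [pvShift, pvMerge]

-- A's outer candidate loop computes the argmin of B's fold, for every candidate list
lemma pvOuter_eq_best (cols : List String) (cands : List String) :
    pvA_outer cols cands = (pvBest cands cols).map Prod.snd := by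
  induction cands with
  | nil =>
    have : pvBest [] cols = none := by
      induction cols with
      | nil => rfl
      | cons col rest ih =>
        rw [pvBest_cons, ih]
        by_cases h : col = "" <;> simp [pvEntry, h, pvMerge, pvRank_go]
    simp [pvA_outer, this]
  | cons c cs ih =>
    cases h : pvA_inner c cols with
    | some col0 =>
      simp [pvA_outer, h, pvBest_zero c cs cols col0 h]
    | none =>
      simp only [pvA_outer, h]
      rw [ih, pvBest_shift c cs cols h]
      cases pvBest cs cols with
      | none => rfl
      | some p => obtain ⟨r, a⟩ := p; rfl

-- ===== VERDICT (by name: the statement is the Claim_ definition above) =====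
theorem find_description_column_spec : Claim_equal_find_description_column := by
  intro columns _
  unfold Spec_find_description_column find_description_column find_description_column_alt
  rw [show ((none, none) : Option (Nat × String) × Option String) = (none, none) from rfl,
      pvFold_pair]
  rw [pvFb_eq_fallback]
  have hb := pvOuter_eq_best columns pvCandidates
  rw [show columns.foldl (pvBestStep pvCandidates) none = pvBest pvCandidates columns from rfl]
  cases h : pvBest pvCandidates columns with
  | none => rw [hb, h]; rfl
  | some p => obtain ⟨r, c⟩ := p; rw [hb, h]; rfl
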